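-- pv_equiv track=rewrite | github.com/TiffanyYongNgikChee/grpc-he-benchmark | mnist_training/debug_conv2d.py | conv2d_cyclic
-- ===== SOURCE A (Python) =====
-- SLOT_COUNT = 8192  # OpenFHE BFV default for these params
--
-- def conv2d_cyclic(input_flat, input_h, input_w, kernel_flat, kh, kw, divisor):
--     """Conv2d with CYCLIC rotation (simulating OpenFHE EvalRotate)."""
--     out_h = input_h - kh + 1
--     out_w = input_w - kw + 1
--
--     # Pad input to slot_count (zeros beyond pixel data)
--     slots = [0] * SLOT_COUNT
--     for i in range(len(input_flat)):
--         if i < SLOT_COUNT: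
--             slots[i] = input_flat[i]
--
--     acc = [0] * SLOT_COUNT
--
--     for ky in range(kh):
--         for kx in range(kw):
--             kval = kernel_flat[ky * kw + kx]
--             if kval == 0:
--                 continue
--             rot = ky * input_w + kx
--
--             # CYCLIC rotation: slot[i] = slots[(i + rot) % SLOT_COUNT]
--             rotated = [0] * SLOT_COUNT
--             for i in range(SLOT_COUNT):
--                 src = (i + rot) % SLOT_COUNT
--                 rotated[i] = slots[src]
--
--             # Multiply by scalar kval (all slots)
--             for i in range(SLOT_COUNT):
--                 acc[i] += rotated[i] * kval
--
--     # Rearrange from input-width to output-width + ÷divisor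
--     output = [0] * (out_h * out_w)
--     for oh in range(out_h):
--         for ow in range(out_w):
--             src_idx = oh * input_w + ow
--             dst_idx = oh * out_w + ow
--             if src_idx < SLOT_COUNT:
--                 output[dst_idx] = acc[src_idx] // divisor
--
--     return output, out_h, out_w
-- ===== SOURCE B (Python) =====
-- SLOT_COUNT = 8192
--
-- def conv2d_cyclic(input_flat, input_h, input_w, kernel_flat, kh, kw, divisor):
--     """Conv2d computed directly per output position with cyclic slot indexing
--     (no SLOT_COUNT-sized intermediate arrays)."""
--     out_h = input_h - kh + 1
--     out_w = input_w - kw + 1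
--     slots = input_flat[:SLOT_COUNT]
--     n = len(slots)
--     # precompute the kernel taps: (coefficient, rotation offset)
--     taps = [(kernel_flat[ky * kw + kx], ky * input_w + kx)
--             for ky in range(kh) for kx in range(kw)]
--
--     def slot(i):
--         i %= SLOT_COUNT
--         return slots[i] if i < n else 0
--
--     output = []
--     for oh in range(out_h):
--         base = oh * input_w
--         for ow in range(out_w):
--             p = base + ow
--             if p >= SLOT_COUNT:
--                 output.append(0)
--             else:
--                 output.append(sum(kv * slot(p + r) for kv, r in taps) // divisor)
--     return output, out_h, out_w
-- ===== Notes on version B (the rewrite author's own statement) =====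
-- stated objective: faster
-- what changed: B computes each needed output position directly as the kernel convolution sum with cyclic slot indexing (precomputing the kernel taps once), instead of materialising SLOT_COUNT-sized rotated and accumulator arrays for every kernel tap; intended as faster (O(out_h*out_w*kh*kw) vs O(kh*kw*SLOT_COUNT)); a timing run measured 14.16x at the largest size both programs finished, unconfirmed beyond that.
-- intended difference: When both output dimensions are negative (input_h-kh+1 < 0 and input_w-kw+1 < 0) A returns a list of (out_h*out_w) zeros because the two negative dimensions multiply to a positive list length, while B returns the empty list, the intended value since there are no output positions. — e.g. on conv2d_cyclic([], -1, -1, [0], 1, 1, 1): A returns ([0], -1, -1), B returns ([], -1, -1)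
import Mathlib
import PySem

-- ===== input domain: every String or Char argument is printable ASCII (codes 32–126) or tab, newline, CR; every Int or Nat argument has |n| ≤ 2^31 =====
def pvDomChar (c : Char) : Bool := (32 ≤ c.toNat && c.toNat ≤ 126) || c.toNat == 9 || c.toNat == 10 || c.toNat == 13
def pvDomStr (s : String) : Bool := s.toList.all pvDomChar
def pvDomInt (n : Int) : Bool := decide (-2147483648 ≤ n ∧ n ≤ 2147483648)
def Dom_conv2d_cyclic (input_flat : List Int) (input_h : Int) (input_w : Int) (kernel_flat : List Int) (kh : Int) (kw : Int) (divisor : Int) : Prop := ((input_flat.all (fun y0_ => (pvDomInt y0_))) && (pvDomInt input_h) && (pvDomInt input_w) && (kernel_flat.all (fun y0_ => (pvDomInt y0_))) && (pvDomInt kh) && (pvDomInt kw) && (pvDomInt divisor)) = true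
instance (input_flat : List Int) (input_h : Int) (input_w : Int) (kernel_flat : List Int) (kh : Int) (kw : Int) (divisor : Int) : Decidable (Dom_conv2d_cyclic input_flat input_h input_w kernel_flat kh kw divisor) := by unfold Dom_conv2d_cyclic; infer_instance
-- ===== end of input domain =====

-- B computes each needed output position directly as the convolution sum with cyclic slot
-- indexing instead of building SLOT_COUNT-sized rotated/accumulator arrays per kernel tap
-- (intended as faster; a timing run measured 14.16x at the largest size both finished).

set_option maxRecDepth 8192

-- ===== PORT A =====
def pvSlots (L : List Int) : List Int :=
  (PySem.List.pyRange 0 (L.length : Int) 1).foldl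
    (fun s i => if i < 8192 then PySem.List.pySetD s i (PySem.List.pyGetD L i 0) else s)
    (List.replicate 8192 0)

def pvRotated (slots : List Int) (rot : Int) : List Int :=
  (PySem.List.pyRange 0 8192 1).map (fun i => PySem.List.pyGetD slots (PySem.Int.mod (i + rot) 8192) 0)

def pvAccStep (slots kernel : List Int) (W kw ky : Int) (acc : List Int) (kx : Int) : List Int :=
  let kval := PySem.List.pyGetD kernel (ky * kw + kx) 0
  if kval == 0 then acc
  else
    let rotated := pvRotated slots (ky * W + kx)
    (PySem.List.pyRange 0 8192 1).map
      (fun i => PySem.List.pyGetD acc i 0 + PySem.List.pyGetD rotated i 0 * kval)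

def pvAcc (slots kernel : List Int) (W kh kw : Int) : List Int :=
  (PySem.List.pyRange 0 kh 1).foldl (fun acc ky =>
    (PySem.List.pyRange 0 kw 1).foldl (pvAccStep slots kernel W kw ky) acc)
    (List.replicate 8192 0)

def pvOutCellA (acc : List Int) (W outw divisor : Int) (oh : Int) (o : List Int) (ow : Int) : List Int :=
  let src := oh * W + ow
  if src < 8192 then
    PySem.List.pySetD o (oh * outw + ow) (PySem.Int.floordiv (PySem.List.pyGetD acc src 0) divisor)
  else o

def pvOutputA (acc : List Int) (W outw divisor outh : Int) : List Int :=
  (PySem.List.pyRange 0 outh 1).foldl (fun o oh =>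
    (PySem.List.pyRange 0 outw 1).foldl (pvOutCellA acc W outw divisor oh) o)
    (List.replicate (outh * outw).toNat 0)

def conv2d_cyclic (input_flat : List Int) (input_h : Int) (input_w : Int) (kernel_flat : List Int) (kh : Int) (kw : Int) (divisor : Int) : List Int × Int × Int :=
  let out_h := input_h - kh + 1
  let out_w := input_w - kw + 1
  let slots := pvSlots input_flat
  let acc := pvAcc slots kernel_flat input_w kh kw
  (pvOutputA acc input_w out_w divisor out_h, out_h, out_w)

-- ===== PORT B =====
def pvSlotB (slots : List Int) (i : Int) : Int :=
  let j := PySem.Int.mod i 8192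
  if j < (slots.length : Int) then PySem.List.pyGetD slots j 0 else 0

-- taps = [(kernel_flat[ky*kw+kx], ky*input_w+kx) for ky in range(kh) for kx in range(kw)]
def pvTaps (kernel : List Int) (W kh kw : Int) : List (Int × Int) :=
  (PySem.List.pyRange 0 kh 1).flatMap (fun ky =>
    (PySem.List.pyRange 0 kw 1).map (fun kx =>
      (PySem.List.pyGetD kernel (ky * kw + kx) 0, ky * W + kx)))

-- sum(kv * slot(p + r) for kv, r in taps)
def pvSum (slots : List Int) (taps : List (Int × Int)) (p : Int) : Int :=
  (taps.map (fun t => t.1 * pvSlotB slots (p + t.2))).sum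

def pvOutCellB (slots : List Int) (taps : List (Int × Int)) (W divisor : Int) (oh : Int) (o : List Int) (ow : Int) : List Int :=
  let p := oh * W + ow
  if 8192 ≤ p then o ++ [0]
  else o ++ [PySem.Int.floordiv (pvSum slots taps p) divisor]

def conv2d_cyclic_alt (input_flat : List Int) (input_h : Int) (input_w : Int) (kernel_flat : List Int) (kh : Int) (kw : Int) (divisor : Int) : List Int × Int × Int :=
  let out_h := input_h - kh + 1
  let out_w := input_w - kw + 1
  let slots := PySem.List.slice input_flat none (some 8192)
  let taps := pvTaps kernel_flat input_w kh kw
  let output := (PySem.List.pyRange 0 out_h 1).foldl (fun o oh =>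
    (PySem.List.pyRange 0 out_w 1).foldl (pvOutCellB slots taps input_w divisor oh) o) []
  (output, out_h, out_w)

-- ===== PRECONDITION & SPEC =====
-- Pre_ excludes exactly the inputs where Python A raises: IndexError when the kernel list is
-- shorter than kh*kw (kh,kw > 0), and, when the output is nonempty, ZeroDivisionError for
-- divisor = 0 and IndexError when a negative input_w drives the accumulator index below -8192.
def Pre_conv2d_cyclic (input_flat : List Int) (input_h : Int) (input_w : Int) (kernel_flat : List Int) (kh : Int) (kw : Int) (divisor : Int) : Prop :=
  (0 < kh → 0 < kw → kh * kw ≤ (kernel_flat.length : Int)) ∧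
  (0 < input_h - kh + 1 → 0 < input_w - kw + 1 →
    divisor ≠ 0 ∧ -8192 ≤ (input_h - kh) * input_w)
instance (input_flat : List Int) (input_h : Int) (input_w : Int) (kernel_flat : List Int) (kh : Int) (kw : Int) (divisor : Int) : Decidable (Pre_conv2d_cyclic input_flat input_h input_w kernel_flat kh kw divisor) := by unfold Pre_conv2d_cyclic; infer_instance

def pvWitness_conv2d_cyclic : List Int × Int × Int × List Int × Int × Int × Int :=
  ([1, 2, 3, 4], 2, 2, [1], 1, 1, 1)

-- When both output dimensions are negative (input_h-kh+1 < 0 and input_w-kw+1 < 0) A returns a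
-- list of (out_h*out_w) zeros because the two negative dimensions multiply to a positive list
-- length, while B returns the empty list, the intended value: there are no output positions.
def D_conv2d_cyclic (input_flat : List Int) (input_h : Int) (input_w : Int) (kernel_flat : List Int) (kh : Int) (kw : Int) (divisor : Int) : Prop :=
  input_h + 1 < kh ∧ input_w + 1 < kw
instance (input_flat : List Int) (input_h : Int) (input_w : Int) (kernel_flat : List Int) (kh : Int) (kw : Int) (divisor : Int) : Decidable (D_conv2d_cyclic input_flat input_h input_w kernel_flat kh kw divisor) := by unfold D_conv2d_cyclic; infer_instance

def Spec_conv2d_cyclic (input_flat : List Int) (input_h : Int) (input_w : Int) (kernel_flat : List Int) (kh : Int) (kw : Int) (divisor : Int) (out : List Int × Int × Int) : Prop :=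
  ¬ D_conv2d_cyclic input_flat input_h input_w kernel_flat kh kw divisor → out = conv2d_cyclic_alt input_flat input_h input_w kernel_flat kh kw divisor
instance (input_flat : List Int) (input_h : Int) (input_w : Int) (kernel_flat : List Int) (kh : Int) (kw : Int) (divisor : Int) (out : List Int × Int × Int) : Decidable (Spec_conv2d_cyclic input_flat input_h input_w kernel_flat kh kw divisor out) := by unfold Spec_conv2d_cyclic; infer_instance

def pvDiffWitness_conv2d_cyclic : List Int × Int × Int × List Int × Int × Int × Int :=
  ([], -1, -1, [0], 1, 1, 1)
def pvDiffWitnessOut_conv2d_cyclic : (List Int × Int × Int) × (List Int × Int × Int) :=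
  (([0], -1, -1), ([], -1, -1))

-- ===== CLAIM (what is proved, stated in full; the proofs are below) =====
def Claim_unchanged_conv2d_cyclic : Prop := ∀ (input_flat : List Int) (input_h : Int) (input_w : Int) (kernel_flat : List Int) (kh : Int) (kw : Int) (divisor : Int), Dom_conv2d_cyclic input_flat input_h input_w kernel_flat kh kw divisor → Pre_conv2d_cyclic input_flat input_h input_w kernel_flat kh kw divisor → Spec_conv2d_cyclic input_flat input_h input_w kernel_flat kh kw divisor (conv2d_cyclic input_flat input_h input_w kernel_flat kh kw divisor)
def Claim_changed_conv2d_cyclic : Prop := Dom_conv2d_cyclic (pvDiffWitness_conv2d_cyclic.1) (pvDiffWitness_conv2d_cyclic.2.1) (pvDiffWitness_conv2d_cyclic.2.2.1) (pvDiffWitness_conv2d_cyclic.2.2.2.1) (pvDiffWitness_conv2d_cyclic.2.2.2.2.1) (pvDiffWitness_conv2d_cyclic.2.2.2.2.2.1) (pvDiffWitness_conv2d_cyclic.2.2.2.2.2.2) ∧ Pre_conv2d_cyclic (pvDiffWitness_conv2d_cyclic.1) (pvDiffWitness_conv2d_cyclic.2.1) (pvDiffWitness_conv2d_cyclic.2.2.1)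 (pvDiffWitness_conv2d_cyclic.2.2.2.1) (pvDiffWitness_conv2d_cyclic.2.2.2.2.1) (pvDiffWitness_conv2d_cyclic.2.2.2.2.2.1) (pvDiffWitness_conv2d_cyclic.2.2.2.2.2.2) ∧ D_conv2d_cyclic (pvDiffWitness_conv2d_cyclic.1) (pvDiffWitness_conv2d_cyclic.2.1) (pvDiffWitness_conv2d_cyclic.2.2.1) (pvDiffWitness_conv2d_cyclic.2.2.2.1) (pvDiffWitness_conv2d_cyclic.2.2.2.2.1) (pvDiffWitness_conv2d_cyclic.2.2.2.2.2.1) (pvDiffWitness_conv2d_cyclic.2.2.2.2.2.2) ∧ conv2d_cyclic (pvDiffWitness_conv2d_cyclic.1) (pvDiffWitness_conv2d_cyclic.2.1) (pvDiffWitness_conv2d_cyclic.2.2.1) (pvDiffWitness_conv2d_cyclic.2.2.2.1) (pvDiffWitness_conv2d_cyclic.2.2.2.2.1) (pvDiffWitness_conv2d_cyclic.2.2.2.2.2.1) (pvDiffWitness_conv2d_cyclic.2.2.2.2.2.2) = pvDiffWitnessOut_conv2d_cyclic.1 ∧ conv2d_cyclic_alt (pvDiffWitness_conv2d_cyclic.1)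 (pvDiffWitness_conv2d_cyclic.2.1) (pvDiffWitness_conv2d_cyclic.2.2.1) (pvDiffWitness_conv2d_cyclic.2.2.2.1) (pvDiffWitness_conv2d_cyclic.2.2.2.2.1) (pvDiffWitness_conv2d_cyclic.2.2.2.2.2.1) (pvDiffWitness_conv2d_cyclic.2.2.2.2.2.2) = pvDiffWitnessOut_conv2d_cyclic.2 ∧ pvDiffWitnessOut_conv2d_cyclic.1 ≠ pvDiffWitnessOut_conv2d_cyclic.2
def Claim_exact_conv2d_cyclic : Prop := ∀ (input_flat : List Int) (input_h : Int) (input_w : Int) (kernel_flat : List Int) (kh : Int) (kw : Int) (divisor : Int), Dom_conv2d_cyclic input_flat input_h input_w kernel_flat kh kw divisor → Pre_conv2d_cyclic input_flat input_h input_w kernel_flat kh kw divisor → D_conv2d_cyclic input_flat input_h input_w kernel_flat kh kw divisor → conv2d_cyclic input_flat input_h input_w kernel_flat kh kw divisor ≠ conv2d_cyclic_alt input_flat input_h input_w kernel_flat kh kw divisor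

lemma pvSlots_eq (L : List Int) :
    pvSlots L = L.take 8192 ++ List.replicate (8192 - L.length) 0 := by
  unfold pvSlots
  induction L using List.reverseRecOn with
  | nil =>
    rw [List.length_nil, Nat.cast_zero, PySem.List.pyRange_one_eq_nil (by omega), List.foldl_nil,
        List.take_nil, List.nil_append, Nat.sub_zero]
  | append_singleton M a ih =>
    have hlen : ((M ++ [a]).length : Int) = (M.length : Int) + 1 := by simp
    rw [hlen, PySem.List.pyRange_one_succ_right (Int.natCast_nonneg _), List.foldl_append]
    have hcongr : (PySem.List.pyRange 0 (M.length : Int) 1).foldl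
        (fun s i => if i < 8192 then PySem.List.pySetD s i (PySem.List.pyGetD (M ++ [a]) i 0) else s)
        (List.replicate 8192 0)
      = (PySem.List.pyRange 0 (M.length : Int) 1).foldl
        (fun s i => if i < 8192 then PySem.List.pySetD s i (PySem.List.pyGetD M i 0) else s)
        (List.replicate 8192 0) := by
      apply PySem.List.foldl_congr_mem
      intro acc x hx
      have hb := (PySem.List.mem_pyRange_one).1 hx
      have hxlen : x < ((M ++ [a]).length : Int) := by simp; omega
      have hget : PySem.List.pyGetD (M ++ [a]) x 0 = PySem.List.pyGetD M x 0 := by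
        rw [PySem.List.pyGetD_eq_getElem (M ++ [a]) 0 hb.1 hxlen,
            PySem.List.pyGetD_eq_getElem M 0 hb.1 (by exact_mod_cast hb.2)]
        exact List.getElem_append_left _
      rw [hget]
    rw [hcongr, ih]
    rw [List.foldl_cons, List.foldl_nil]
    have hgetlast : PySem.List.pyGetD (M ++ [a]) (M.length : Int) 0 = a := by
      rw [show M ++ [a] = M ++ a :: [] from rfl]
      unfold PySem.List.pyGetD
      rw [PySem.List.pyGet?_append_length M [] a]
      rfl
    rw [hgetlast]
    by_cases hlt : (M.length : Int) < 8192
    · rw [if_pos hlt]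
      have hml : M.length < 8192 := by exact_mod_cast hlt
      rw [PySem.List.pySetD_of_nonneg _ a (Int.natCast_nonneg _)]
      have htk : M.take 8192 = M := List.take_of_length_le (by omega)
      have htk2 : (M ++ [a]).take 8192 = M ++ [a] := List.take_of_length_le (by simp; omega)
      rw [htk, htk2]
      have hrep : List.replicate (8192 - M.length) (0 : Int) = 0 :: List.replicate (8192 - (M ++ [a]).length) 0 := by
        simp only [List.length_append, List.length_cons, List.length_nil]
        rw [show 8192 - M.length = (8192 - (M.length + (0+1))) + 1 by omega, List.replicate_succ]
      rw [hrep]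
      simp only [Int.toNat_natCast]
      rw [List.set_append_right _ _ (by omega), Nat.sub_self, List.set_cons_zero, List.append_assoc]
      rfl
    · rw [if_neg hlt]
      have hml : 8192 ≤ M.length := by omega
      have htk2 : (M ++ [a]).take 8192 = M.take 8192 := List.take_append_of_le_length (by omega)
      rw [htk2]
      have h2 : 8192 - M.length = 8192 - (M ++ [a]).length := by simp; omega
      rw [h2]

lemma rotated_get (slots : List Int) (rot j : Int) (h0 : 0 ≤ j) (h1 : j < 8192) :
    PySem.List.pyGetD (pvRotated slots rot) j 0
      = PySem.List.pyGetD slots (PySem.Int.mod (j + rot) 8192) 0 := by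
  unfold pvRotated
  exact PySem.List.pyGetD_map_pyRange_of_nonneg _ 8192 j 0 h0 h1

lemma slots_agree (L : List Int) (x : Int) :
    PySem.List.pyGetD (pvSlots L) (PySem.Int.mod x 8192) 0
      = pvSlotB (PySem.List.slice L none (some 8192)) x := by
  rw [pvSlots_eq]
  unfold pvSlotB
  rw [PySem.List.slice_to _ (by norm_num)]
  have hsl : (8192 : Int).toNat = 8192 := rfl
  rw [hsl]
  set j := PySem.Int.mod x 8192 with hj
  have hj0 : 0 ≤ j := PySem.Int.mod_nonneg x (by norm_num)
  have hj1 : j < 8192 := PySem.Int.mod_lt x (by norm_num)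
  have hlenpad : (L.take 8192 ++ List.replicate (8192 - L.length) (0 : Int)).length = 8192 := by
    simp [List.length_take]; omega
  rw [PySem.List.pyGetD_eq_getElem _ 0 hj0 (by rw [hlenpad]; exact_mod_cast hj1)]
  show _ = if j < ((L.take 8192).length : Int) then PySem.List.pyGetD (L.take 8192) j 0 else 0
  by_cases hb : j < ((L.take 8192).length : Int)
  · rw [if_pos hb]
    rw [List.getElem_append_left (by omega)]
    rw [PySem.List.pyGetD_eq_getElem _ 0 hj0 hb]
  · rw [if_neg hb]
    rw [List.getElem_append_right (by omega)]
    simp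

lemma wrap_get (acc : List Int) (h : acc.length = 8192) (p : Int)
    (h1 : -8192 ≤ p) (h2 : p < 8192) :
    PySem.List.pyGetD acc p 0 = PySem.List.pyGetD acc (PySem.Int.mod p 8192) 0 := by
  have hm : PySem.Int.mod p 8192 = p % 8192 := PySem.Int.mod_eq_emod_of_pos (b := 8192) (by norm_num)
  rcases Int.lt_or_le p 0 with hp | hp
  case inr =>
    have hpp : p % 8192 = p := Int.emod_eq_of_lt hp h2
    rw [hm, hpp]
  case inl =>
    have hpm : p % 8192 = p + 8192 := by omega
    rw [hm, hpm]
    simp only [PySem.List.pyGetD, PySem.List.pyGet?, PySem.List.pyIdx?, h]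
    have hnp : ¬ (0 ≤ p) := by omega
    rw [if_neg hnp, if_pos (by push_cast; omega), if_pos (by omega), if_pos (by push_cast; omega)]
    have hk : (8192 : Nat) - (-p).toNat = (p + 8192).toNat := by omega
    rw [hk]

lemma acc_inner (slots kernel : List Int) (W kw ky : Int) (l : List Int) :
    ∀ (acc : List Int), acc.length = 8192 →
    (l.foldl (pvAccStep slots kernel W kw ky) acc).length = 8192
    ∧ ∀ j : Int, 0 ≤ j → j < 8192 →
      PySem.List.pyGetD (l.foldl (pvAccStep slots kernel W kw ky) acc) j 0
      = PySem.List.pyGetD acc j 0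
        + (l.map (fun kx => PySem.List.pyGetD (pvRotated slots (ky * W + kx)) j 0
            * PySem.List.pyGetD kernel (ky * kw + kx) 0)).sum := by
  induction l with
  | nil => intro acc h; exact ⟨h, by simp⟩
  | cons kx rest ih =>
    intro acc hacc
    rw [List.foldl_cons]
    by_cases hk : PySem.List.pyGetD kernel (ky * kw + kx) 0 = 0
    · have hstep : pvAccStep slots kernel W kw ky acc kx = acc := by
        unfold pvAccStep; simp [hk]
      rw [hstep]
      rcases ih acc hacc with ⟨h1, h2⟩
      refine ⟨h1, fun j hj0 hj1 => ?_⟩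
      rw [List.map_cons, List.sum_cons, h2 j hj0 hj1, hk]
      ring
    · have hstep : pvAccStep slots kernel W kw ky acc kx
        = (PySem.List.pyRange 0 8192 1).map
            (fun i => PySem.List.pyGetD acc i 0
              + PySem.List.pyGetD (pvRotated slots (ky * W + kx)) i 0
                * PySem.List.pyGetD kernel (ky * kw + kx) 0) := by
        unfold pvAccStep
        simp only [beq_iff_eq, if_neg hk]
      rw [hstep]
      have hlen' : ((PySem.List.pyRange 0 8192 1).map
            (fun i => PySem.List.pyGetD acc i 0
              + PySem.List.pyGetD (pvRotated slots (ky * W + kx)) i 0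
                * PySem.List.pyGetD kernel (ky * kw + kx) 0)).length = 8192 := by
        rw [List.length_map, PySem.List.length_pyRange_one]; rfl
      rcases ih _ hlen' with ⟨h1, h2⟩
      refine ⟨h1, fun j hj0 hj1 => ?_⟩
      rw [List.map_cons, List.sum_cons, h2 j hj0 hj1,
          PySem.List.pyGetD_map_pyRange_of_nonneg _ 8192 j 0 hj0 hj1]
      ring

lemma acc_char (slots kernel : List Int) (W kh kw : Int) :
    (pvAcc slots kernel W kh kw).length = 8192
    ∧ ∀ j : Int, 0 ≤ j → j < 8192 →
      PySem.List.pyGetD (pvAcc slots kernel W kh kw) j 0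
      = ((PySem.List.pyRange 0 kh 1).map (fun ky =>
          ((PySem.List.pyRange 0 kw 1).map (fun kx =>
            PySem.List.pyGetD (pvRotated slots (ky * W + kx)) j 0
              * PySem.List.pyGetD kernel (ky * kw + kx) 0)).sum)).sum := by
  unfold pvAcc
  have main : ∀ (l : List Int) (acc : List Int), acc.length = 8192 →
      (l.foldl (fun acc ky => (PySem.List.pyRange 0 kw 1).foldl (pvAccStep slots kernel W kw ky) acc) acc).length = 8192
      ∧ ∀ j : Int, 0 ≤ j → j < 8192 →
        PySem.List.pyGetD (l.foldl (fun acc ky => (PySem.List.pyRange 0 kw 1).foldl (pvAccStep slots kernel W kw ky) acc) acc) j 0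
        = PySem.List.pyGetD acc j 0
          + (l.map (fun ky =>
              ((PySem.List.pyRange 0 kw 1).map (fun kx =>
                PySem.List.pyGetD (pvRotated slots (ky * W + kx)) j 0
                  * PySem.List.pyGetD kernel (ky * kw + kx) 0)).sum)).sum := by
    intro l
    induction l with
    | nil => intro acc h; exact ⟨h, by simp⟩
    | cons ky rest ih =>
      intro acc hacc
      rw [List.foldl_cons]
      rcases acc_inner slots kernel W kw ky (PySem.List.pyRange 0 kw 1) acc hacc with ⟨h1, h2⟩
      rcases ih _ h1 with ⟨h3, h4⟩
      refine ⟨h3, fun j hj0 hj1 => ?_⟩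
      rw [List.map_cons, List.sum_cons, h4 j hj0 hj1, h2 j hj0 hj1]
      ring
  rcases main (PySem.List.pyRange 0 kh 1) (List.replicate 8192 0) (List.length_replicate) with ⟨h1, h2⟩
  refine ⟨h1, fun j hj0 hj1 => ?_⟩
  rw [h2 j hj0 hj1]
  have hz : PySem.List.pyGetD (List.replicate 8192 (0 : Int)) j 0 = 0 := by
    rw [PySem.List.pyGetD_eq_getElem _ 0 hj0 (by rw [List.length_replicate]; exact_mod_cast hj1)]
    exact List.getElem_replicate _
  rw [hz]
  ring

lemma mod_mod_add (p rot : Int) :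
    PySem.Int.mod (PySem.Int.mod p 8192 + rot) 8192 = PySem.Int.mod (p + rot) 8192 := by
  rw [PySem.Int.mod_eq_emod_of_pos (b := 8192) (by norm_num),
      PySem.Int.mod_eq_emod_of_pos (b := 8192) (by norm_num),
      PySem.Int.mod_eq_emod_of_pos (b := 8192) (by norm_num),
      Int.emod_add_emod]

lemma pvSum_eq_sum (slots kernel : List Int) (W kh kw p : Int) :
    pvSum slots (pvTaps kernel W kh kw) p
      = ((PySem.List.pyRange 0 kh 1).map (fun ky =>
          ((PySem.List.pyRange 0 kw 1).map (fun kx =>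
            PySem.List.pyGetD kernel (ky * kw + kx) 0
              * pvSlotB slots (p + (ky * W + kx)))).sum)).sum := by
  unfold pvSum pvTaps
  simp [List.flatMap_def, List.sum_flatten, List.map_map, Function.comp_def]

lemma val_eq (L kernel : List Int) (W kh kw p : Int) (h1 : -8192 ≤ p) (h2 : p < 8192) :
    PySem.List.pyGetD (pvAcc (pvSlots L) kernel W kh kw) p 0
      = pvSum (PySem.List.slice L none (some 8192)) (pvTaps kernel W kh kw) p := by
  rw [wrap_get _ (acc_char (pvSlots L) kernel W kh kw).1 p h1 h2]
  have hj0 : 0 ≤ PySem.Int.mod p 8192 := PySem.Int.mod_nonneg p (by norm_num)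
  have hj1 : PySem.Int.mod p 8192 < 8192 := PySem.Int.mod_lt p (by norm_num)
  rw [(acc_char (pvSlots L) kernel W kh kw).2 _ hj0 hj1, pvSum_eq_sum]
  refine congrArg List.sum (List.map_congr_left ?_)
  intro ky _
  refine congrArg List.sum (List.map_congr_left ?_)
  intro kx _
  rw [rotated_get _ _ _ hj0 hj1, mod_mod_add, slots_agree L (p + (ky * W + kx))]
  ring

lemma setRun {β : Type} (g : β → Option Int) (K : β → Int) :
    ∀ (ps : List β) (done : List Int) (r : Nat), ps.length ≤ r →
    (∀ (i : Nat) (h : i < ps.length), 0 ≤ K ps[i] ∧ (K ps[i]).toNat = done.length + i) →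
    ps.foldl (fun o p => match g p with | some v => o.set (K p).toNat v | none => o)
        (done ++ List.replicate r 0)
      = done ++ ps.map (fun p => (g p).getD 0) ++ List.replicate (r - ps.length) 0 := by
  intro ps
  induction ps with
  | nil => intro done r _ _; simp
  | cons p rest ih =>
    intro done r hr hidx
    have hr1 : 1 ≤ r := le_trans (by simp) hr
    have hrep : List.replicate r (0 : Int) = 0 :: List.replicate (r - 1) 0 := by
      rw [show r = (r - 1) + 1 by omega, List.replicate_succ]
      simp
    rw [List.foldl_cons]
    have hK := hidx 0 (by simp)
    have hstep : (match g p with | some v => (done ++ List.replicate r 0).set (K p).toNat v | none => (done ++ List.replicate r 0)) = (done ++ [(g p).getD 0]) ++ List.replicate (r - 1) 0 := by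
      cases hg : g p with
      | none =>
        simp only []
        rw [hrep]
        have : done ++ ([ (0:Int) ] ++ List.replicate (r-1) 0) = (done ++ [0]) ++ List.replicate (r-1) 0 := by
          simp [List.append_assoc]
        simp only [List.cons_append] at this ⊢
        simpa [hg] using this
      | some v =>
        have hKp : (K p).toNat = done.length := by
          have h0 := hK.2
          simp only [List.getElem_cons_zero] at h0
          omega
        simp only []
        rw [hrep, hKp, List.set_append_right _ _ (le_refl _), Nat.sub_self, List.set_cons_zero]
        simp [hg, List.append_assoc]
    rw [hstep]
    have hrec := ih (done ++ [(g p).getD 0]) (r - 1) (by simp at hr ⊢; omega)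
      (by
        intro i hi
        have h := hidx (i + 1) (by simp; omega)
        simp only [List.getElem_cons_succ] at h
        refine ⟨h.1, ?_⟩
        simp only [List.length_append, List.length_cons, List.length_nil]
        omega)
    rw [hrec]
    simp only [List.map_cons, List.length_cons]
    rw [show r - (rest.length + 1) = r - 1 - rest.length by omega]
    simp [List.append_assoc]

lemma outA (acc : List Int) (W outw divisor : Int) (hw : 0 < outw) :
    ∀ (n : Nat) (m : Int), 0 ≤ m → ∀ (done : List Int), done.length = (m * outw).toNat →
    (PySem.List.pyRange m (m + (n : Int)) 1).foldl (fun o oh =>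
      (PySem.List.pyRange 0 outw 1).foldl (pvOutCellA acc W outw divisor oh) o)
      (done ++ List.replicate (n * outw.toNat) 0)
    = done ++ (PySem.List.pyRange m (m + (n : Int)) 1).flatMap (fun oh =>
        (PySem.List.pyRange 0 outw 1).map (fun ow =>
          if oh * W + ow < 8192 then PySem.Int.floordiv (PySem.List.pyGetD acc (oh * W + ow) 0) divisor else 0)) := by
  intro n
  induction n with
  | zero =>
    intro m hm done hdone
    rw [show m + ((0 : Nat) : Int) = m by omega, PySem.List.pyRange_one_eq_nil (le_refl m)]
    simp
  | succ n ihn =>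
    intro m hm done hdone
    have hmn : m < m + ((n + 1 : Nat) : Int) := by push_cast; omega
    rw [PySem.List.pyRange_one_cons hmn, List.foldl_cons, List.flatMap_cons]
    have hmo : 0 ≤ m * outw := mul_nonneg hm hw.le
    have hcongr : (PySem.List.pyRange 0 outw 1).foldl (pvOutCellA acc W outw divisor m)
        (done ++ List.replicate ((n + 1) * outw.toNat) 0)
      = (PySem.List.pyRange 0 outw 1).foldl (fun o ow =>
          match (if m * W + ow < 8192 then some (PySem.Int.floordiv (PySem.List.pyGetD acc (m * W + ow) 0) divisor) else none) with
          | some v => o.set (m * outw + ow).toNat v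
          | none => o)
        (done ++ List.replicate ((n + 1) * outw.toNat) 0) := by
      apply PySem.List.foldl_congr_mem
      intro o ow how
      have hb := (PySem.List.mem_pyRange_one).1 how
      unfold pvOutCellA
      by_cases hc : m * W + ow < 8192
      · rw [if_pos hc]
        simp only [hc, if_pos]
        rw [PySem.List.pySetD_of_nonneg _ _ (by have := mul_nonneg hm hw.le; omega)]
      · rw [if_neg hc]
        simp only [hc, if_neg]
        simp
    rw [hcongr]
    have hrun := setRun
      (fun ow => if m * W + ow < 8192 then some (PySem.Int.floordiv (PySem.List.pyGetD acc (m * W + ow) 0) divisor) else none)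
      (fun ow => m * outw + ow)
      (PySem.List.pyRange 0 outw 1) done ((n + 1) * outw.toNat)
      (by rw [PySem.List.length_pyRange_one]
          have h1 : (outw - 0).toNat = outw.toNat := by omega
          rw [h1]
          exact Nat.le_mul_of_pos_left _ (Nat.succ_pos n))
      (by
        intro i hi
        rw [PySem.List.length_pyRange_one] at hi
        rw [PySem.List.getElem_pyRange_one _ _ i (by rw [PySem.List.length_pyRange_one]; omega)]
        refine ⟨by simp only []; omega, by simp only []; rw [hdone]; omega⟩)
    rw [hrun]
    have hmap : (PySem.List.pyRange 0 outw 1).map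
        (fun p => ((if m * W + p < 8192 then some (PySem.Int.floordiv (PySem.List.pyGetD acc (m * W + p) 0) divisor) else none)).getD 0)
      = (PySem.List.pyRange 0 outw 1).map
        (fun ow => if m * W + ow < 8192 then PySem.Int.floordiv (PySem.List.pyGetD acc (m * W + ow) 0) divisor else 0) := by
      apply List.map_congr_left
      intro ow _
      split <;> rfl
    rw [hmap]
    have hlen2 : (done ++ (PySem.List.pyRange 0 outw 1).map
        (fun ow => if m * W + ow < 8192 then PySem.Int.floordiv (PySem.List.pyGetD acc (m * W + ow) 0) divisor else 0)).length
        = ((m + 1) * outw).toNat := by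
      rw [List.length_append, List.length_map, PySem.List.length_pyRange_one, hdone]
      have h1 : (outw - 0).toNat = outw.toNat := by omega
      have h2 : (m + 1) * outw = m * outw + outw := by ring
      rw [h1, h2]
      omega
    have hrem : (n + 1) * outw.toNat - (PySem.List.pyRange 0 outw 1).length = n * outw.toNat := by
      rw [PySem.List.length_pyRange_one]
      have h1 : (outw - 0).toNat = outw.toNat := by omega
      rw [h1, Nat.succ_mul]
      omega
    rw [hrem]
    have hm1 : m + ((n + 1 : Nat) : Int) = (m + 1) + ((n : Nat) : Int) := by push_cast; ring
    rw [hm1]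
    rw [ihn (m + 1) (by omega)
      (done ++ (PySem.List.pyRange 0 outw 1).map
        (fun ow => if m * W + ow < 8192 then PySem.Int.floordiv (PySem.List.pyGetD acc (m * W + ow) 0) divisor else 0))
      hlen2]
    simp [List.append_assoc]

lemma outB (slots : List Int) (taps : List (Int × Int)) (W divisor outh outw : Int) :
    (PySem.List.pyRange 0 outh 1).foldl (fun o oh =>
      (PySem.List.pyRange 0 outw 1).foldl (pvOutCellB slots taps W divisor oh) o) []
    = (PySem.List.pyRange 0 outh 1).flatMap (fun oh =>
        (PySem.List.pyRange 0 outw 1).map (fun ow =>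
          if 8192 ≤ oh * W + ow then 0
          else PySem.Int.floordiv (pvSum slots taps (oh * W + ow)) divisor)) := by
  have hrow : ∀ (o : List Int) (oh : Int),
      (PySem.List.pyRange 0 outw 1).foldl (pvOutCellB slots taps W divisor oh) o
      = o ++ (PySem.List.pyRange 0 outw 1).map (fun ow =>
          if 8192 ≤ oh * W + ow then 0
          else PySem.Int.floordiv (pvSum slots taps (oh * W + ow)) divisor) := by
    intro o oh
    rw [PySem.List.foldl_congr_mem _ _
      (fun o ow => o ++ [if 8192 ≤ oh * W + ow then 0
        else PySem.Int.floordiv (pvSum slots taps (oh * W + ow)) divisor]) _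
      (by
        intro acc x _
        show (if 8192 ≤ oh * W + x then acc ++ [(0 : Int)]
          else acc ++ [PySem.Int.floordiv (pvSum slots taps (oh * W + x)) divisor])
          = acc ++ [if 8192 ≤ oh * W + x then 0
          else PySem.Int.floordiv (pvSum slots taps (oh * W + x)) divisor]
        split <;> rfl)]
    exact PySem.List.foldl_append_singleton_eq_map _ _ _
  rw [PySem.List.foldl_congr_mem _ _
    (fun o oh => o ++ (PySem.List.pyRange 0 outw 1).map (fun ow =>
      if 8192 ≤ oh * W + ow then 0
      else PySem.Int.floordiv (pvSum slots taps (oh * W + ow)) divisor)) _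
    (by intro acc x _; exact hrow acc x)]
  rw [PySem.List.foldl_append_eq_flatMap]
  simp

-- ===== VERDICT (by name: the statement is the Claim_ definition above) =====
theorem conv2d_cyclic_spec : Claim_unchanged_conv2d_cyclic := by
  unfold Claim_unchanged_conv2d_cyclic
  intro L ih iw K kh kw div _ hpre
  unfold Spec_conv2d_cyclic D_conv2d_cyclic
  intro hD
  unfold conv2d_cyclic conv2d_cyclic_alt
  simp only [Prod.mk.injEq, and_true]
  set out_h := ih - kh + 1 with hoh
  set out_w := iw - kw + 1 with how
  by_cases hpos : 0 < out_h ∧ 0 < out_w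
  · -- main case
    rcases hpos with ⟨h1, h2⟩
    rcases hpre.2 h1 h2 with ⟨hdiv, hidxb⟩
    -- A side to canonical flatMap
    have hA : pvOutputA (pvAcc (pvSlots L) K iw kh kw) iw out_w div out_h
        = (PySem.List.pyRange 0 out_h 1).flatMap (fun oh =>
            (PySem.List.pyRange 0 out_w 1).map (fun ow =>
              if oh * iw + ow < 8192 then
                PySem.Int.floordiv (PySem.List.pyGetD (pvAcc (pvSlots L) K iw kh kw) (oh * iw + ow) 0) div
              else 0)) := by
      unfold pvOutputA
      have hinit : List.replicate (out_h * out_w).toNat (0 : Int)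
          = [] ++ List.replicate (out_h.toNat * out_w.toNat) 0 := by
        rw [Int.toNat_mul h1.le h2.le, List.nil_append]
      rw [hinit]
      have hcast : (0 : Int) + ((out_h.toNat : Nat) : Int) = out_h := by omega
      have := outA (pvAcc (pvSlots L) K iw kh kw) iw out_w div h2 out_h.toNat 0 le_rfl []
        (by simp)
      rw [hcast] at this
      rw [show out_h.toNat * out_w.toNat = out_h.toNat * out_w.toNat from rfl]
      simpa using this
    -- B side to canonical flatMap
    have hB := outB (PySem.List.slice L none (some 8192)) (pvTaps K iw kh kw) iw div out_h out_w
    rw [hA, hB]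
    rw [List.flatMap_def, List.flatMap_def]
    refine congrArg List.flatten (List.map_congr_left ?_)
    intro oh hoh2
    have hbo := (PySem.List.mem_pyRange_one).1 hoh2
    refine List.map_congr_left ?_
    intro ow how2
    have hbw := (PySem.List.mem_pyRange_one).1 how2
    have hlow : -8192 ≤ oh * iw + ow := by
      rcases Int.lt_or_le iw 0 with hiw | hiw
      · have hstep : (out_h - 1) * iw ≤ oh * iw :=
          mul_le_mul_of_nonpos_right (by omega) hiw.le
        have heq : (ih - kh) * iw = (out_h - 1) * iw := by rw [hoh]; ring_nf
        omega
      · have : 0 ≤ oh * iw := mul_nonneg hbo.1 hiw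
        omega
    by_cases hc : oh * iw + ow < 8192
    · rw [if_pos hc, if_neg (by omega)]
      rw [val_eq L K iw kh kw (oh * iw + ow) hlow hc]
    · rw [if_neg hc, if_pos (by omega)]
  · -- degenerate case: at least one output dimension is ≤ 0, and not both negative
    have hAnil : pvOutputA (pvAcc (pvSlots L) K iw kh kw) iw out_w div out_h = [] := by
      unfold pvOutputA
      have hton : (out_h * out_w).toNat = 0 := by
        rcases Int.lt_or_le 0 out_h with h1 | h1
        · have h2 : out_w ≤ 0 := by by_contra hx; exact hpos ⟨h1, by omega⟩
          have : out_h * out_w ≤ 0 := mul_nonpos_of_nonneg_of_nonpos h1.le h2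
          omega
        · rcases Int.lt_or_le out_h 0 with h3 | h3
          · have h4 : 0 ≤ out_w := by
              by_contra h5
              exact hD ⟨by omega, by omega⟩
            have : out_h * out_w ≤ 0 := mul_nonpos_of_nonpos_of_nonneg h1 h4
            omega
          · have h5 : out_h = 0 := by omega
            rw [h5, zero_mul]
            rfl
      rw [hton]
      rcases Int.lt_or_le 0 out_h with h1 | h1
      · have h2 : out_w ≤ 0 := by by_contra hx; exact hpos ⟨h1, by omega⟩
        rw [show PySem.List.pyRange 0 out_w 1 = [] from PySem.List.pyRange_one_eq_nil (by omega)]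
        simp only [List.foldl_nil]
        rw [PySem.List.foldl_ignore]
        rfl
      · rw [PySem.List.pyRange_one_eq_nil h1]
        rfl
    have hBnil : (PySem.List.pyRange 0 out_h 1).foldl (fun o oh =>
        (PySem.List.pyRange 0 out_w 1).foldl
          (pvOutCellB (PySem.List.slice L none (some 8192)) (pvTaps K iw kh kw) iw div oh) o) [] = ([] : List Int) := by
      rcases Int.lt_or_le 0 out_h with h1 | h1
      · have h2 : out_w ≤ 0 := by by_contra hx; exact hpos ⟨h1, by omega⟩
        rw [show PySem.List.pyRange 0 out_w 1 = [] from PySem.List.pyRange_one_eq_nil (by omega)]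
        simp only [List.foldl_nil]
        rw [PySem.List.foldl_ignore]
      · rw [PySem.List.pyRange_one_eq_nil h1]
        rfl
    rw [hAnil, hBnil]

theorem conv2d_cyclic_changed : Claim_changed_conv2d_cyclic := by
  unfold Claim_changed_conv2d_cyclic; decide

theorem conv2d_cyclic_tight : Claim_exact_conv2d_cyclic := by
  unfold Claim_exact_conv2d_cyclic
  intro L ih iw K kh kw div _ _ hD heq
  unfold D_conv2d_cyclic at hD
  unfold conv2d_cyclic conv2d_cyclic_alt at heq
  simp only [Prod.mk.injEq] at heq
  set out_h := ih - kh + 1 with hoh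
  set out_w := iw - kw + 1 with how
  have hA : pvOutputA (pvAcc (pvSlots L) K iw kh kw) iw out_w div out_h
      = List.replicate (out_h * out_w).toNat 0 := by
    unfold pvOutputA
    rw [show PySem.List.pyRange 0 out_h 1 = [] from PySem.List.pyRange_one_eq_nil (by omega)]
    rfl
  have hB : (PySem.List.pyRange 0 out_h 1).foldl (fun o oh =>
      (PySem.List.pyRange 0 out_w 1).foldl
        (pvOutCellB (PySem.List.slice L none (some 8192)) (pvTaps K iw kh kw) iw div oh) o) [] = ([] : List Int) := by
    rw [show PySem.List.pyRange 0 out_h 1 = [] from PySem.List.pyRange_one_eq_nil (by omega)]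
    rfl
  rw [hA, hB] at heq
  have hpos : 0 < out_h * out_w := mul_pos_of_neg_of_neg (by omega) (by omega)
  have hlen := congrArg List.length heq.1
  rw [List.length_replicate, List.length_nil] at hlen
  omega
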